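-- pv_equiv track=rewrite | github.com/zachsussman/little-cc | experimental/regalloc/regalloc.py | find_horizons
-- ===== SOURCE A (Python) =====
-- def find_horizons(program, regs):
--     horizons = {r : 0 for r in range(regs)}
--     for k in range(len(program)-1, -1, -1):
--         st = program[k]
--         if len(st) > 2:
--             if horizons[st[2]] == 0:
--                 horizons[st[2]] = k
--         if len(st) > 1:
--             if horizons[st[1]] == 0:
--                 horizons[st[1]] = k
--     return horizons
-- ===== SOURCE B (Python) =====
-- def find_horizons(program, regs):
--     horizons = {r: 0 for r in range(regs)}
--     for k, st in enumerate(program):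
--         if len(st) > 1:
--             horizons[st[1]] = k
--         if len(st) > 2:
--             horizons[st[2]] = k
--     return horizons
-- ===== Notes on version B (the rewrite author's own statement) =====
-- stated objective: simpler
-- what changed: One forward pass with unconditional last-write-wins assignments (the maximum use index is simply the last one written) replaces A's backward scan whose per-register '== 0' read-guards keep only the first nonzero index seen; the guard branches and dict reads disappear.
import Mathlib
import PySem

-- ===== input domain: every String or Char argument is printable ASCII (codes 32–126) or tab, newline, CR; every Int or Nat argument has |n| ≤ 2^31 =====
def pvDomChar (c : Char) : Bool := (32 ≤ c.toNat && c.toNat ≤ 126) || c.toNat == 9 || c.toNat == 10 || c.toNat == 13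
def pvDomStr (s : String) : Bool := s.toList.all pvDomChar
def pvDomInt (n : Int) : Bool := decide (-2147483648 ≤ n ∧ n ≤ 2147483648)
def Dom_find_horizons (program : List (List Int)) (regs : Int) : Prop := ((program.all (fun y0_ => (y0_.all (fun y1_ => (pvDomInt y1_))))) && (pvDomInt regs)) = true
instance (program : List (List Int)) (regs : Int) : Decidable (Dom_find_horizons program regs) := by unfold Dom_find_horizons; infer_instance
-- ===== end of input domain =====

-- B replaces A's backward scan with '== 0' first-nonzero-keeps guards by one forward pass of
-- unconditional last-write-wins assignments (objective: simpler).


-- ===== PORT A =====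
def find_horizons (program : List (List Int)) (regs : Int) : List (Int × Int) :=
  ((PySem.List.pyRange ((program.length : Int) - 1) (-1) (-1)).foldl (fun d k =>
      let st := PySem.List.pyGetD program k []
      let d1 := if 2 < st.length then
          (if d.getD (PySem.List.pyGetD st 2 0) 0 = 0 then d.insert (PySem.List.pyGetD st 2 0) k else d)
        else d
      if 1 < st.length then
          (if d1.getD (PySem.List.pyGetD st 1 0) 0 = 0 then d1.insert (PySem.List.pyGetD st 1 0) k else d1)
        else d1) ((PySem.List.pyRange 0 regs 1).foldl (fun d r => d.insert r 0) PySem.Dict.empty)).items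

-- ===== PORT B =====
def find_horizons_alt (program : List (List Int)) (regs : Int) : List (Int × Int) :=
  ((PySem.List.enumerate program 0).foldl (fun d p =>
      let d1 := if 1 < p.2.length then d.insert (PySem.List.pyGetD p.2 1 0) p.1 else d
      if 2 < p.2.length then d1.insert (PySem.List.pyGetD p.2 2 0) p.1 else d1)
    ((PySem.List.pyRange 0 regs 1).foldl (fun d r => d.insert r 0) PySem.Dict.empty)).items

-- ===== PRECONDITION & SPEC =====
-- Pre_ excludes exactly the programs referencing a register outside range(regs): there A raises KeyError.
def Pre_find_horizons (program : List (List Int)) (regs : Int) : Prop :=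
  ∀ st ∈ program, (1 < st.length → 0 ≤ st.getD 1 0 ∧ st.getD 1 0 < regs) ∧
                  (2 < st.length → 0 ≤ st.getD 2 0 ∧ st.getD 2 0 < regs)
instance (program : List (List Int)) (regs : Int) : Decidable (Pre_find_horizons program regs) := by
  unfold Pre_find_horizons; infer_instance
def pvWitness_find_horizons : List (List Int) × Int := ([[0, 1], [2, 0, 1], [7]], 3)

def Spec_find_horizons (program : List (List Int)) (regs : Int) (out : List (Int × Int)) : Prop := out = find_horizons_alt program regs
instance (program : List (List Int)) (regs : Int) (out : List (Int × Int)) : Decidable (Spec_find_horizons program regs out) := by unfold Spec_find_horizons; infer_instance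

-- ===== CLAIM (what is proved, stated in full; the proofs are below) =====
def Claim_equal_find_horizons : Prop := ∀ (program : List (List Int)) (regs : Int), Dom_find_horizons program regs → Pre_find_horizons program regs → Spec_find_horizons program regs (find_horizons program regs)
-- ===== LEMMAS AND PROOFS =====

-- 'register r is referenced by statement st'
def pvHit (r : Int) (st : List Int) : Bool :=
  decide ((2 < st.length ∧ PySem.List.pyGetD st 2 0 = r) ∨ (1 < st.length ∧ PySem.List.pyGetD st 1 0 = r))

-- the two guarded writes of A's loop body, and their composition on an (index, statement) pair
def pvA2 (d : PySem.Dict Int Int) (p : Int × List Int) : PySem.Dict Int Int :=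
  if 2 < p.2.length then
    (if d.getD (PySem.List.pyGetD p.2 2 0) 0 = 0 then d.insert (PySem.List.pyGetD p.2 2 0) p.1 else d) else d
def pvA1 (d : PySem.Dict Int Int) (p : Int × List Int) : PySem.Dict Int Int :=
  if 1 < p.2.length then
    (if d.getD (PySem.List.pyGetD p.2 1 0) 0 = 0 then d.insert (PySem.List.pyGetD p.2 1 0) p.1 else d) else d
def pvStepA (d : PySem.Dict Int Int) (p : Int × List Int) : PySem.Dict Int Int :=
  pvA1 (pvA2 d p) p

-- the two unconditional writes of B's loop body, and their composition
def pvB1 (d : PySem.Dict Int Int) (p : Int × List Int) : PySem.Dict Int Int :=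
  if 1 < p.2.length then d.insert (PySem.List.pyGetD p.2 1 0) p.1 else d
def pvB2 (d : PySem.Dict Int Int) (p : Int × List Int) : PySem.Dict Int Int :=
  if 2 < p.2.length then d.insert (PySem.List.pyGetD p.2 2 0) p.1 else d
def pvStepB (d : PySem.Dict Int Int) (p : Int × List Int) : PySem.Dict Int Int :=
  pvB2 (pvB1 d p) p

def pvInit (regs : Int) : PySem.Dict Int Int :=
  (PySem.List.pyRange 0 regs 1).foldl (fun d r => d.insert r 0) PySem.Dict.empty

theorem pv_enum_bounds (prog : List (List Int)) (s : Int) :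
    ∀ p ∈ PySem.List.enumerate prog s, s ≤ p.1 ∧ p.1 < s + prog.length := by
  induction prog generalizing s with
  | nil => intro p hp; simp [PySem.List.enumerate] at hp
  | cons x t ih =>
    intro p hp
    rw [PySem.List.enumerate_cons] at hp
    rcases List.mem_cons.mp hp with hp | hp
    · subst hp; simp
    · have := ih (s+1) p hp; simp only [List.length_cons]; push_cast; omega

theorem pv_lookup_enum (prog : List (List Int)) (s : Int) (hs : 0 ≤ s) :
    ∀ p ∈ PySem.List.enumerate prog s, PySem.List.pyGetD prog (p.1 - s) [] = p.2 := by
  induction prog generalizing s with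
  | nil => intro p hp; simp [PySem.List.enumerate] at hp
  | cons x t ih =>
    intro p hp
    rw [PySem.List.enumerate_cons] at hp
    rcases List.mem_cons.mp hp with hp | hp
    · subst hp; simp
    · have h2 := ih (s+1) (by omega) p hp
      obtain ⟨hge, hlt⟩ := pv_enum_bounds t (s+1) p hp
      have he : p.1 - s = (p.1 - (s+1)) + 1 := by omega
      rw [he, ← h2]
      rw [PySem.List.pyGetD_eq_getElem _ _ (by omega)
            (by simp only [List.length_cons]; push_cast; omega),
          PySem.List.pyGetD_eq_getElem _ _ (by omega) (by push_cast; omega)]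
      have hn : (p.1 - (s+1) + 1).toNat = (p.1 - (s+1)).toNat + 1 := by omega
      simp only [hn, List.getElem_cons_succ]

theorem pv_snd_enum (prog : List (List Int)) (s : Int) :
    ∀ p ∈ PySem.List.enumerate prog s, p.2 ∈ prog := by
  intro p hp
  have := PySem.List.map_snd_enumerate prog s
  rw [← this]
  exact List.mem_map_of_mem hp

theorem pv_init_getD (regs : Int) (r : Int) : (pvInit regs).getD r 0 = 0 := by
  have g : ∀ (L : List Int) (d : PySem.Dict Int Int), (∀ x, d.getD x 0 = 0) →
      ∀ x, (L.foldl (fun d r => d.insert r 0) d).getD x 0 = 0 := by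
    intro L
    induction L with
    | nil => intro d h x; simpa using h x
    | cons a t ih =>
      intro d h x
      simp only [List.foldl_cons]
      exact ih _ (fun y => by rw [PySem.Dict.getD_insert]; split <;> simp [h]) x
  exact g _ _ (fun x => PySem.Dict.getD_empty x 0) r

theorem pv_init_mem (regs : Int) (r : Int) (h0 : 0 ≤ r) (h1 : r < regs) :
    r ∈ (pvInit regs).keys := by
  have g : ∀ (L : List Int) (d : PySem.Dict Int Int) (x : Int), x ∈ L ∨ x ∈ d.keys →
      x ∈ (L.foldl (fun d r => d.insert r 0) d).keys := by
    intro L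
    induction L with
    | nil => intro d x h; simpa using h
    | cons a t ih =>
      intro d x h
      simp only [List.foldl_cons]
      apply ih
      rcases h with h | h
      · rcases List.mem_cons.mp h with h | h
        · right; rw [PySem.Dict.mem_keys_insert]; left; exact h
        · left; exact h
      · right; rw [PySem.Dict.mem_keys_insert]; right; exact h
  exact g _ _ _ (Or.inl (PySem.List.mem_pyRange_one.mpr ⟨h0, h1⟩))

theorem pv_init_nodup (regs : Int) : (pvInit regs).keys.Nodup := by
  exact PySem.Dict.nodup_keys_foldl_insert _ (fun _ _ => 0) _ (by simp)

def pvRefOK (ks : List Int) (p : Int × List Int) : Prop :=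
  (1 < p.2.length → PySem.List.pyGetD p.2 1 0 ∈ ks) ∧ (2 < p.2.length → PySem.List.pyGetD p.2 2 0 ∈ ks)

theorem pv_ins_keys (d d' : PySem.Dict Int Int) (k v : Int) (he : d'.keys = d.keys)
    (hk : k ∈ d.keys) : (d'.insert k v).keys = d.keys := by
  rw [PySem.Dict.keys_insert_of_contains]
  · exact he
  · rw [PySem.Dict.contains_iff_mem_keys, he]; exact hk

theorem pv_stepA_keys (d : PySem.Dict Int Int) (p : Int × List Int) (h : pvRefOK d.keys p) :
    (pvStepA d p).keys = d.keys := by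
  obtain ⟨h1, h2⟩ := h
  have k2 : (pvA2 d p).keys = d.keys := by
    unfold pvA2; split_ifs with c g
    · exact pv_ins_keys d d _ _ rfl (h2 c)
    · rfl
    · rfl
  unfold pvStepA pvA1
  split_ifs with c g
  · exact pv_ins_keys d _ _ _ k2 (h1 c)
  · exact k2
  · exact k2

theorem pv_stepB_keys (d : PySem.Dict Int Int) (p : Int × List Int) (h : pvRefOK d.keys p) :
    (pvStepB d p).keys = d.keys := by
  obtain ⟨h1, h2⟩ := h
  have k1 : (pvB1 d p).keys = d.keys := by
    unfold pvB1; split_ifs with c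
    · exact pv_ins_keys d d _ _ rfl (h1 c)
    · rfl
  unfold pvStepB pvB2
  split_ifs with c
  · exact pv_ins_keys d _ _ _ k1 (h2 c)
  · exact k1

theorem pv_keysA (L : List (Int × List Int)) (d : PySem.Dict Int Int)
    (h : ∀ p ∈ L, pvRefOK d.keys p) : (L.foldr (fun p d => pvStepA d p) d).keys = d.keys := by
  induction L with
  | nil => rfl
  | cons p t ih =>
    simp only [List.foldr_cons]
    have ht := ih (fun q hq => h q (List.mem_cons_of_mem _ hq))
    have hp := h p List.mem_cons_self
    rw [pv_stepA_keys _ _ (by rw [ht]; exact hp)]  -- keys of inner fold = d.keys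
    exact ht

theorem pv_keysB (L : List (Int × List Int)) (d : PySem.Dict Int Int)
    (h : ∀ p ∈ L, pvRefOK d.keys p) : (L.foldl pvStepB d).keys = d.keys := by
  induction L generalizing d with
  | nil => rfl
  | cons p t ih =>
    simp only [List.foldl_cons]
    have hp := h p List.mem_cons_self
    have hk := pv_stepB_keys d p hp
    rw [ih _ (fun q hq => by rw [hk]; exact h q (List.mem_cons_of_mem _ hq)), hk]

theorem pv_gw_getD (d : PySem.Dict Int Int) (key k r : Int) :
    (if d.getD key 0 = 0 then d.insert key k else d).getD r 0
      = if key = r ∧ d.getD r 0 = 0 then k else d.getD r 0 := by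
  by_cases hv : d.getD key 0 = 0
  · rw [if_pos hv, PySem.Dict.getD_insert]
    by_cases hk : r = key
    · subst hk; rw [if_pos rfl, if_pos ⟨rfl, hv⟩]
    · rw [if_neg hk, if_neg (fun hc => hk hc.1.symm)]
  · rw [if_neg hv, if_neg (fun hc => hv (by rw [hc.1]; exact hc.2))]

theorem pv_A2_getD (d : PySem.Dict Int Int) (p : Int × List Int) (r : Int) :
    (pvA2 d p).getD r 0
      = if 2 < p.2.length ∧ PySem.List.pyGetD p.2 2 0 = r ∧ d.getD r 0 = 0 then p.1 else d.getD r 0 := by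
  unfold pvA2
  by_cases c : 2 < p.2.length
  · rw [if_pos c, pv_gw_getD]
    split_ifs <;> first | rfl | tauto
  · rw [if_neg c, if_neg (by tauto)]

theorem pv_A1_getD (d : PySem.Dict Int Int) (p : Int × List Int) (r : Int) :
    (pvA1 d p).getD r 0
      = if 1 < p.2.length ∧ PySem.List.pyGetD p.2 1 0 = r ∧ d.getD r 0 = 0 then p.1 else d.getD r 0 := by
  unfold pvA1
  by_cases c : 1 < p.2.length
  · rw [if_pos c, pv_gw_getD]
    split_ifs <;> first | rfl | tauto
  · rw [if_neg c, if_neg (by tauto)]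

theorem pv_stepA_getD (d : PySem.Dict Int Int) (p : Int × List Int) (r : Int) :
    (pvStepA d p).getD r 0 = if pvHit r p.2 ∧ d.getD r 0 = 0 then p.1 else d.getD r 0 := by
  unfold pvStepA
  rw [pv_A1_getD, pv_A2_getD]
  simp only [pvHit, decide_eq_true_eq]
  split_ifs <;> first | rfl | tauto

theorem pv_uw_getD (d : PySem.Dict Int Int) (key k r : Int) :
    (d.insert key k).getD r 0 = if key = r then k else d.getD r 0 := by
  rw [PySem.Dict.getD_insert]
  by_cases h : r = key
  · subst h; simp
  · rw [if_neg h, if_neg (fun hc => h hc.symm)]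

theorem pv_B1_getD (d : PySem.Dict Int Int) (p : Int × List Int) (r : Int) :
    (pvB1 d p).getD r 0
      = if 1 < p.2.length ∧ PySem.List.pyGetD p.2 1 0 = r then p.1 else d.getD r 0 := by
  unfold pvB1
  by_cases c : 1 < p.2.length
  · rw [if_pos c, pv_uw_getD]
    split_ifs <;> first | rfl | tauto
  · rw [if_neg c, if_neg (by tauto)]

theorem pv_B2_getD (d : PySem.Dict Int Int) (p : Int × List Int) (r : Int) :
    (pvB2 d p).getD r 0
      = if 2 < p.2.length ∧ PySem.List.pyGetD p.2 2 0 = r then p.1 else d.getD r 0 := by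
  unfold pvB2
  by_cases c : 2 < p.2.length
  · rw [if_pos c, pv_uw_getD]
    split_ifs <;> first | rfl | tauto
  · rw [if_neg c, if_neg (by tauto)]

theorem pv_stepB_getD (d : PySem.Dict Int Int) (p : Int × List Int) (r : Int) :
    (pvStepB d p).getD r 0 = if pvHit r p.2 then p.1 else d.getD r 0 := by
  unfold pvStepB
  rw [pv_B2_getD, pv_B1_getD]
  simp only [pvHit, decide_eq_true_eq]
  split_ifs <;> first | rfl | tauto

theorem pv_valA (L : List (Int × List Int)) (d : PySem.Dict Int Int) (r : Int) :
    (L.foldr (fun p d => pvStepA d p) d).getD r 0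
      = L.foldr (fun p v => if pvHit r p.2 ∧ v = 0 then p.1 else v) (d.getD r 0) := by
  induction L with
  | nil => rfl
  | cons p t ih =>
    simp only [List.foldr_cons]
    rw [pv_stepA_getD, ih]

theorem pv_valB (L : List (Int × List Int)) (d : PySem.Dict Int Int) (r : Int) :
    (L.foldl pvStepB d).getD r 0
      = L.foldl (fun v p => if pvHit r p.2 then p.1 else v) (d.getD r 0) := by
  induction L generalizing d with
  | nil => rfl
  | cons p t ih =>
    simp only [List.foldl_cons]
    rw [ih, pv_stepB_getD]

theorem pv_noHit_foldl (L : List (Int × List Int)) (r : Int) (v : Int)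
    (h : ∀ p ∈ L, pvHit r p.2 = false) :
    L.foldl (fun v p => if pvHit r p.2 then p.1 else v) v = v := by
  induction L generalizing v with
  | nil => rfl
  | cons p t ih =>
    simp only [List.foldl_cons]
    rw [h p List.mem_cons_self]
    simp only [Bool.false_eq_true, if_false]
    exact ih v (fun q hq => h q (List.mem_cons_of_mem _ hq))

theorem pv_hit_foldl_init (L : List (Int × List Int)) (r : Int) (v w : Int)
    (h : ∃ p ∈ L, pvHit r p.2 = true) :
    L.foldl (fun v p => if pvHit r p.2 then p.1 else v) v
      = L.foldl (fun v p => if pvHit r p.2 then p.1 else v) w := by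
  induction L generalizing v w with
  | nil => simp at h
  | cons p t ih =>
    simp only [List.foldl_cons]
    by_cases hp : pvHit r p.2
    · rw [if_pos hp, if_pos hp]
    · rw [if_neg hp, if_neg hp]
      rcases h with ⟨q, hq, hhit⟩
      rcases List.mem_cons.mp hq with h1 | h1
      · subst h1; simp [hhit] at hp
      · exact ih v w ⟨q, h1, hhit⟩

theorem pv_hit_foldl_pos (L : List (Int × List Int)) (r : Int) :
    (∀ p ∈ L, 0 < p.1) → (∃ p ∈ L, pvHit r p.2 = true) →
    0 < L.foldl (fun v p => if pvHit r p.2 then p.1 else v) 0 := by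
  induction L with
  | nil => intro _ h; simp at h
  | cons p t ih =>
    intro hpos h
    simp only [List.foldl_cons]
    by_cases ht : ∃ q ∈ t, pvHit r q.2 = true
    · rw [pv_hit_foldl_init t r _ 0 ht]
      exact ih (fun q hq => hpos q (List.mem_cons_of_mem _ hq)) ht
    · push_neg at ht
      have hall : ∀ q ∈ t, pvHit r q.2 = false := by
        intro q hq; simpa using ht q hq
      rw [pv_noHit_foldl t r _ hall]
      rcases h with ⟨q, hq, hhit⟩
      rcases List.mem_cons.mp hq with h1 | h1
      · rw [if_pos (by rw [← h1]; exact hhit)]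
        exact hpos _ List.mem_cons_self
      · rw [hall q h1] at hhit; simp at hhit

theorem pv_scalar (prog : List (List Int)) (s : Int) (r : Int) (hs : 0 ≤ s) :
    (PySem.List.enumerate prog s).foldr (fun p v => if pvHit r p.2 ∧ v = 0 then p.1 else v) 0
      = (PySem.List.enumerate prog s).foldl (fun v p => if pvHit r p.2 then p.1 else v) 0 := by
  induction prog generalizing s with
  | nil => rfl
  | cons x t ih =>
    rw [PySem.List.enumerate_cons]
    simp only [List.foldr_cons, List.foldl_cons]
    rw [ih (s+1) (by omega)]
    by_cases hex : ∃ q ∈ PySem.List.enumerate t (s+1), pvHit r q.2 = true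
    · have hpos := pv_hit_foldl_pos (PySem.List.enumerate t (s+1)) r
        (fun q hq => by have := pv_enum_bounds t (s+1) q hq; omega) hex
      rw [if_neg (fun hc => absurd hc.2 (by omega))]
      exact pv_hit_foldl_init _ r 0 _ hex
    · push_neg at hex
      have hall : ∀ q ∈ PySem.List.enumerate t (s+1), pvHit r q.2 = false := by
        intro q hq; simpa using hex q hq
      rw [pv_noHit_foldl _ r _ hall, pv_noHit_foldl _ r _ hall]
      by_cases hp : pvHit r x <;> simp [hp]

theorem pv_A_eq (program : List (List Int)) (regs : Int) :
    find_horizons program regs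
      = ((PySem.List.enumerate program 0).foldr (fun p d => pvStepA d p) (pvInit regs)).items := by
  unfold find_horizons pvInit
  have h1 : PySem.List.pyRange ((program.length : Int) - 1) (-1) (-1)
      = ((PySem.List.enumerate program 0).map (fun p => p.1)).reverse := by
    rw [PySem.List.pyRange_neg_one_eq_reverse, PySem.List.map_fst_enumerate]
    norm_num
  rw [h1, ← List.map_reverse, List.foldl_map]
  rw [PySem.List.foldl_congr_mem _ _ (fun d (p : Int × List Int) => pvStepA d p) _ ?_]
  · rw [List.foldl_reverse]
  · intro acc p hp
    have h := pv_lookup_enum program 0 (le_refl 0) p (List.mem_reverse.mp hp)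
    rw [sub_zero] at h
    simp only [pvStepA, pvA1, pvA2, ← h]

theorem pv_B_eq (program : List (List Int)) (regs : Int) :
    find_horizons_alt program regs
      = ((PySem.List.enumerate program 0).foldl pvStepB (pvInit regs)).items := rfl

-- ===== VERDICT (by name: the statement is the Claim_ definition above) =====
theorem find_horizons_spec : Claim_equal_find_horizons := by
  intro program regs hDom hPre
  unfold Spec_find_horizons
  rw [pv_A_eq, pv_B_eq]
  have href : ∀ p ∈ PySem.List.enumerate program 0, pvRefOK (pvInit regs).keys p := by
    intro p hp
    have hmem := pv_snd_enum program 0 p hp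
    obtain ⟨g1, g2⟩ := hPre p.2 hmem
    refine ⟨fun c => ?_, fun c => ?_⟩
    · rw [PySem.List.pyGetD_ofNat' p.2 1 0]
      exact pv_init_mem regs _ (g1 c).1 (g1 c).2
    · rw [PySem.List.pyGetD_ofNat' p.2 2 0]
      exact pv_init_mem regs _ (g2 c).1 (g2 c).2
  have hkA := pv_keysA (PySem.List.enumerate program 0) (pvInit regs) href
  have hkB := pv_keysB (PySem.List.enumerate program 0) (pvInit regs) href
  rw [PySem.Dict.items_eq_map_keys _ (by rw [hkA]; exact pv_init_nodup regs) 0,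
      PySem.Dict.items_eq_map_keys _ (by rw [hkB]; exact pv_init_nodup regs) 0,
      hkA, hkB]
  apply List.map_congr_left
  intro r _
  rw [pv_valA, pv_valB, pv_init_getD, pv_scalar program 0 r (le_refl 0)]
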